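-- pv_equiv track=rewrite | github.com/cgarrot/Test | arbre.py | get_last_line
-- ===== SOURCE A (Python) =====
-- def get_last_line(size):
--
-- 	l_count = 0
-- 	e_count = 4
-- 	star = 1
-- 	offset = 2
--
-- 	for tri in size:
-- 		while (l_count < e_count):
-- 			l_count = l_count + 1
-- 			star = star + 2
--
-- 		if ((l_count == e_count) & ((tri % 2) == 0)):
-- 			star = star - offset
-- 		elif ((l_count == e_count) & ((tri % 2) == 1)):
-- 			star = star - offset
-- 			offset = offset + 2
--
-- 		l_count = 0
-- 		e_count = e_count + 1
--
-- 	return (star)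
-- ===== SOURCE B (Python) =====
-- def get_last_line(size):
--     star = 1
--     odds = 0
--     for i, tri in enumerate(size):
--         star += 2 * (4 + i) - (2 + 2 * odds)
--         if tri % 2 == 1:
--             odds += 1
--     return star
-- ===== Notes on version B (the rewrite author's own statement) =====
-- stated objective: faster
-- what changed: The O(e_count) inner while loop (adding 2 per step) is replaced by a single-pass arithmetic update star += 2*(4+i) - (2+2*odds), tracking only the running count of odd elements.
import Mathlib
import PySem

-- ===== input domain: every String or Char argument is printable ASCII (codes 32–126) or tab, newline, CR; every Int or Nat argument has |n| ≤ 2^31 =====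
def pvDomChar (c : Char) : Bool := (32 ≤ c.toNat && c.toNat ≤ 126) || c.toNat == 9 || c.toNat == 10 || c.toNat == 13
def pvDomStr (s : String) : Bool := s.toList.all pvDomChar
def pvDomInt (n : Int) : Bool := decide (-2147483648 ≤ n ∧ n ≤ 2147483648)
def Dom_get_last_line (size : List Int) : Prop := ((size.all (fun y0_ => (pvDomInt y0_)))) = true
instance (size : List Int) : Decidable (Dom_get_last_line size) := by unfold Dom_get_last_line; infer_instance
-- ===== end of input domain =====

-- B replaces A's quadratic inner while loop by a single-pass arithmetic update (faster, O(n) vs O(n^2)).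

-- ===== PORT A =====
-- the inner 'while (l_count < e_count): l_count += 1; star += 2'
def pvWhileA (l e star : Int) : Int × Int :=
  if l < e then pvWhileA (l + 1) e (star + 2) else (l, star)
termination_by (e - l).toNat
decreasing_by omega

-- one iteration of A's for-loop over state (l_count, e_count, star, offset)
def pvStepA (st : Int × Int × Int × Int) (tri : Int) : Int × Int × Int × Int :=
  let (l0, e, star0, off) := st
  let (l, star) := pvWhileA l0 e star0
  if (l == e) && (PySem.Int.mod tri 2 == 0) then
    (0, e + 1, star - off, off)
  else if (l == e) && (PySem.Int.mod tri 2 == 1) then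
    (0, e + 1, star - off, off + 2)
  else
    (0, e + 1, star, off)

def get_last_line (size : List Int) : Int :=
  (size.foldl pvStepA (0, 4, 1, 2)).2.2.1

-- ===== PORT B =====
-- one iteration of B's for-loop over state (star, odds, i)
def pvStepB (st : Int × Int × Int) (tri : Int) : Int × Int × Int :=
  let (star, odds, i) := st
  let star := star + 2 * (4 + i) - (2 + 2 * odds)
  let odds := if PySem.Int.mod tri 2 == 1 then odds + 1 else odds
  (star, odds, i + 1)

def get_last_line_alt (size : List Int) : Int :=
  (size.foldl pvStepB (1, 0, 0)).1

-- ===== PRECONDITION & SPEC =====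
def Spec_get_last_line (size : List Int) (out : Int) : Prop := out = get_last_line_alt size
instance (size : List Int) (out : Int) : Decidable (Spec_get_last_line size out) := by unfold Spec_get_last_line; infer_instance

-- ===== CLAIM (what is proved, stated in full; the proofs are below) =====
def Claim_equal_get_last_line : Prop := ∀ (size : List Int), Dom_get_last_line size → Spec_get_last_line size (get_last_line size)

-- ===== LEMMAS AND PROOFS =====
theorem pvWhileA_eq (n : Nat) : ∀ (l e star : Int), (e - l).toNat ≤ n → l ≤ e →
    pvWhileA l e star = (e, star + 2 * (e - l)) := by
  induction n with
  | zero =>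
    intro l e star h hle
    have hl : l = e := by omega
    rw [pvWhileA]
    simp [hl]
  | succ n ih =>
    intro l e star h hle
    rw [pvWhileA]
    by_cases hlt : l < e
    · simp only [hlt, if_true]
      rw [ih (l + 1) e (star + 2) (by omega) (by omega)]
      have h2 : star + 2 + 2 * (e - (l + 1)) = star + 2 * (e - l) := by ring
      rw [h2]
    · have hl : l = e := by omega
      simp [hl]

theorem pv_loop_eq : ∀ (size : List Int) (i odds star : Int), 0 ≤ i →
    (size.foldl pvStepA (0, 4 + i, star, 2 + 2 * odds)).2.2.1
      = (size.foldl pvStepB (star, odds, i)).1 := by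
  intro size
  induction size with
  | nil => intro i odds star _; rfl
  | cons tri rest ih =>
    intro i odds star hi
    simp only [List.foldl_cons]
    have hw : pvWhileA 0 (4 + i) star = (4 + i, star + 2 * (4 + i)) := by
      rw [pvWhileA_eq (4 + i).toNat 0 (4 + i) star (by omega) (by omega)]
      ring_nf
    have hme : PySem.Int.mod tri 2 = tri % 2 := PySem.Int.mod_eq_emod_of_pos (by omega)
    have hmod : tri % 2 = 0 ∨ tri % 2 = 1 := Int.emod_two_eq_zero_or_one tri
    rcases hmod with hm | hm
    · have hA : pvStepA (0, 4 + i, star, 2 + 2 * odds) tri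
          = (0, (4 + i) + 1, (star + 2 * (4 + i)) - (2 + 2 * odds), 2 + 2 * odds) := by
        have hd : (2 : Int) ∣ tri := Int.dvd_of_emod_eq_zero hm
        simp [pvStepA, hw, hm]
      have hB : pvStepB (star, odds, i) tri
          = (star + 2 * (4 + i) - (2 + 2 * odds), odds, i + 1) := by
        simp [pvStepB, hm]
      rw [hA, hB]
      have := ih (i + 1) odds (star + 2 * (4 + i) - (2 + 2 * odds)) (by omega)
      calc (rest.foldl pvStepA (0, (4 + i) + 1, (star + 2 * (4 + i)) - (2 + 2 * odds), 2 + 2 * odds)).2.2.1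
          = (rest.foldl pvStepA (0, 4 + (i + 1), star + 2 * (4 + i) - (2 + 2 * odds), 2 + 2 * odds)).2.2.1 := by ring_nf
        _ = (rest.foldl pvStepB (star + 2 * (4 + i) - (2 + 2 * odds), odds, i + 1)).1 := this
    · have hA : pvStepA (0, 4 + i, star, 2 + 2 * odds) tri
          = (0, (4 + i) + 1, (star + 2 * (4 + i)) - (2 + 2 * odds), (2 + 2 * odds) + 2) := by
        have hnd : ¬ (2 : Int) ∣ tri := by
          intro hd
          have := Int.emod_emod_of_dvd tri (dvd_refl 2)
          omega
        simp [pvStepA, hw, hm]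
      have hB : pvStepB (star, odds, i) tri
          = (star + 2 * (4 + i) - (2 + 2 * odds), odds + 1, i + 1) := by
        simp [pvStepB, hm]
      rw [hA, hB]
      have := ih (i + 1) (odds + 1) (star + 2 * (4 + i) - (2 + 2 * odds)) (by omega)
      calc (rest.foldl pvStepA (0, (4 + i) + 1, (star + 2 * (4 + i)) - (2 + 2 * odds), (2 + 2 * odds) + 2)).2.2.1
          = (rest.foldl pvStepA (0, 4 + (i + 1), star + 2 * (4 + i) - (2 + 2 * odds), 2 + 2 * (odds + 1))).2.2.1 := by ring_nf
        _ = (rest.foldl pvStepB (star + 2 * (4 + i) - (2 + 2 * odds), odds + 1, i + 1)).1 := this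

-- ===== VERDICT (by name: the statement is the Claim_ definition above) =====
theorem get_last_line_spec : Claim_equal_get_last_line := by
  intro size _
  unfold Spec_get_last_line get_last_line get_last_line_alt
  have := pv_loop_eq size 0 0 1 (by omega)
  simpa using this
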